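-- pv_equiv track=rewrite | github.com/mxordn/syzygia-analysis | PleiadesMusicae.py | _getDisposition
-- ===== SOURCE A (Python) =====
-- def _getDisposition(intListStr):
--     sortingList = ["P4","m6","M6","P11","m13","M13","P18","m20","M20"]
--     bassDerivates = len([x for x in intListStr if x in ["P1","P8","P15","P22"]]) + 1
--     thirdDerivates = len([x for x in intListStr if x in ["m3","M3","m10","M10","m17","M17"]])
--     fifthDerivates = len([x for x in intListStr if x in ["P5","P12","P19"]])
--     fourthDerivates = len([x for x in intListStr if x in ["P4","P11","P18"]])
--     sixthDerivates = len([x for x in intListStr if x in ["m6","M6","m13","M13","m20","M20"]])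
--
--     classificationList = list(set(intListStr).intersection(sortingList))
--     if classificationList == []:
--         b = bassDerivates
--         m = thirdDerivates
--         s = fifthDerivates
--         return [b, m, s]
--     elif len(set(["P4","P11","P18"]) & set(classificationList)) > 0:
--         b = fourthDerivates
--         m = sixthDerivates
--         s = bassDerivates
--         return [b, m, s]
--     elif len(set(["m6","M6","m13","M13","m20","M20"]) & set(classificationList)) > 0:
--         b = sixthDerivates
--         m = bassDerivates
--         s = thirdDerivates
--         return b, m, s
--     return []
-- ===== SOURCE B (Python) =====
-- def _getDisposition(intListStr):
--     # one pass over the list with five counters; decision taken from the counters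
--     bass, third, fifth, fourth, sixth = 1, 0, 0, 0, 0
--     for x in intListStr:
--         if x in ("P1", "P8", "P15", "P22"):
--             bass += 1
--         elif x in ("m3", "M3", "m10", "M10", "m17", "M17"):
--             third += 1
--         elif x in ("P5", "P12", "P19"):
--             fifth += 1
--         elif x in ("P4", "P11", "P18"):
--             fourth += 1
--         elif x in ("m6", "M6", "m13", "M13", "m20", "M20"):
--             sixth += 1
--     if fourth:
--         return [fourth, sixth, bass]
--     if sixth:
--         return sixth, bass, third
--     return [bass, third, fifth]
-- ===== Notes on version B (the rewrite author's own statement) =====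
-- stated objective: alternative
-- what changed: Replaces A's five list comprehensions plus three set constructions/intersections with a single pass over the list maintaining five counters, deciding the branch from the counters alone (fourth/sixth counter nonzero replaces the set-intersection tests).
import Mathlib
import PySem

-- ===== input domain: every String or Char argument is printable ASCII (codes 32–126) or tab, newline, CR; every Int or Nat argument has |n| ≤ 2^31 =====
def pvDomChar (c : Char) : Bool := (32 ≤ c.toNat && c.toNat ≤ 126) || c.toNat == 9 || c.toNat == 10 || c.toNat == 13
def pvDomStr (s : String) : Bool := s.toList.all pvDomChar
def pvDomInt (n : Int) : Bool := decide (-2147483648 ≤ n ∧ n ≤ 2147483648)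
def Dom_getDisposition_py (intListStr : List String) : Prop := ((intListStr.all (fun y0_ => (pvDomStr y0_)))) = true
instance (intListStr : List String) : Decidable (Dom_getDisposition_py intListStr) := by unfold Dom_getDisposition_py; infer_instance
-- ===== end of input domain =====

-- B replaces A's five comprehension passes and three set constructions/intersections by one
-- counting pass with five counters; equality of the returned triple is proved below.
-- ===== PORT A =====
def getDisposition_py (intListStr : List String) : List Int :=
  let sortingList : List String := ["P4","m6","M6","P11","m13","M13","P18","m20","M20"]
  let bassDerivates : Int :=
    ((intListStr.filter (fun x => (["P1","P8","P15","P22"] : List String).contains x)).length : Int) + 1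
  let thirdDerivates : Int :=
    ((intListStr.filter (fun x => (["m3","M3","m10","M10","m17","M17"] : List String).contains x)).length : Int)
  let fifthDerivates : Int :=
    ((intListStr.filter (fun x => (["P5","P12","P19"] : List String).contains x)).length : Int)
  let fourthDerivates : Int :=
    ((intListStr.filter (fun x => (["P4","P11","P18"] : List String).contains x)).length : Int)
  let sixthDerivates : Int :=
    ((intListStr.filter (fun x => (["m6","M6","m13","M13","m20","M20"] : List String).contains x)).length : Int)
  -- the set below is only tested for emptiness / intersected with other sets,
  -- so Python's (unmodelled) set-iteration order cannot influence the result
  let classificationList : List String :=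
    PySem.Set.inter (PySem.Set.ofList intListStr) sortingList
  if classificationList = [] then
    [bassDerivates, thirdDerivates, fifthDerivates]
  else if 0 < (PySem.Set.inter (PySem.Set.ofList (["P4","P11","P18"] : List String)) classificationList).length then
    [fourthDerivates, sixthDerivates, bassDerivates]
  else if 0 < (PySem.Set.inter (PySem.Set.ofList (["m6","M6","m13","M13","m20","M20"] : List String)) classificationList).length then
    -- Python returns the tuple (b, m, s) here; as a value it is the same triple of ints
    [sixthDerivates, bassDerivates, thirdDerivates]
  else []

-- ===== PORT B =====
def pvStep (c : Int × Int × Int × Int × Int) (x : String) : Int × Int × Int × Int × Int :=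
  let (bass, third, fifth, fourth, sixth) := c
  if (["P1","P8","P15","P22"] : List String).contains x then (bass + 1, third, fifth, fourth, sixth)
  else if (["m3","M3","m10","M10","m17","M17"] : List String).contains x then (bass, third + 1, fifth, fourth, sixth)
  else if (["P5","P12","P19"] : List String).contains x then (bass, third, fifth + 1, fourth, sixth)
  else if (["P4","P11","P18"] : List String).contains x then (bass, third, fifth, fourth + 1, sixth)
  else if (["m6","M6","m13","M13","m20","M20"] : List String).contains x then (bass, third, fifth, fourth, sixth + 1)
  else (bass, third, fifth, fourth, sixth)

def getDisposition_py_alt (intListStr : List String) : List Int :=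
  let c := intListStr.foldl pvStep (1, 0, 0, 0, 0)
  let (bass, third, fifth, fourth, sixth) := c
  if fourth ≠ 0 then [fourth, sixth, bass]
  else if sixth ≠ 0 then [sixth, bass, third]
  else [bass, third, fifth]

-- ===== PRECONDITION & SPEC =====
def Spec_getDisposition_py (intListStr : List String) (out : List Int) : Prop := out = getDisposition_py_alt intListStr
instance (intListStr : List String) (out : List Int) : Decidable (Spec_getDisposition_py intListStr out) := by unfold Spec_getDisposition_py; infer_instance

-- ===== CLAIM (what is proved, stated in full; the proofs are below) =====
def Claim_equal_getDisposition_py : Prop := ∀ (intListStr : List String), Dom_getDisposition_py intListStr → Spec_getDisposition_py intListStr (getDisposition_py intListStr)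

-- ===== LEMMAS AND PROOFS =====

-- B's single pass computes 1 + the bass count and the plain counts of the other four
-- (pairwise disjoint) interval categories.
theorem pvStep_foldl (l : List String) (b t f fo s : Int) :
    l.foldl pvStep (b, t, f, fo, s) =
      (b + (l.countP (fun x => (["P1","P8","P15","P22"] : List String).contains x) : Int),
       t + (l.countP (fun x => (["m3","M3","m10","M10","m17","M17"] : List String).contains x) : Int),
       f + (l.countP (fun x => (["P5","P12","P19"] : List String).contains x) : Int),
       fo + (l.countP (fun x => (["P4","P11","P18"] : List String).contains x) : Int),
       s + (l.countP (fun x => (["m6","M6","m13","M13","m20","M20"] : List String).contains x) : Int)) := by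
  induction l generalizing b t f fo s with
  | nil => simp
  | cons x xs ih =>
    by_cases hx : x ∈ (["P1","P8","P15","P22","m3","M3","m10","M10","m17","M17",
        "P5","P12","P19","P4","P11","P18","m6","M6","m13","M13","m20","M20"] : List String)
    · fin_cases hx <;>
        (simp only [List.foldl_cons]
         simp [pvStep]
         rw [ih]
         simp [Prod.mk.injEq]
         omega)
    · simp only [List.mem_cons, List.not_mem_nil, or_false] at hx
      push Not at hx
      obtain ⟨n1,n2,n3,n4,n5,n6,n7,n8,n9,n10,n11,n12,n13,n14,n15,n16,n17,n18,n19,n20,n21,n22⟩ := hx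
      simp only [List.foldl_cons]
      simp [pvStep, n1, n2, n3, n4, n5, n6, n7, n8, n9, n10, n11, n12, n13, n14, n15, n16, n17, n18,
        n19, n20, n21, n22]
      rw [ih]
      simp

-- membership in A's sorting list splits into the fourth / sixth categories
theorem pv_sorting_split (y : String) :
    (y ∈ (["P4","m6","M6","P11","m13","M13","P18","m20","M20"] : List String)) ↔
      ((["P4","P11","P18"] : List String).contains y = true ∨
       (["m6","M6","m13","M13","m20","M20"] : List String).contains y = true) := by
  simp
  tauto

-- A's classification set is empty iff no fourth and no sixth occurs in the input
theorem pv_class_empty (l : List String) :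
    (PySem.Set.inter (PySem.Set.ofList l) (["P4","m6","M6","P11","m13","M13","P18","m20","M20"] : List String) = []) ↔
      (l.countP (fun x => (["P4","P11","P18"] : List String).contains x) = 0 ∧
       l.countP (fun x => (["m6","M6","m13","M13","m20","M20"] : List String).contains x) = 0) := by
  rw [List.eq_nil_iff_forall_not_mem]
  simp only [PySem.Set.mem_inter, PySem.Set.mem_ofList, List.countP_eq_zero]
  constructor
  · intro h
    constructor <;> intro x hx hpx <;> exact h x ⟨hx, (pv_sorting_split x).mpr (by tauto)⟩
  · rintro ⟨h4, h6⟩ y ⟨hy, hys⟩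
    rcases (pv_sorting_split y).mp hys with h | h
    · exact h4 y hy h
    · exact h6 y hy h

-- A's "category-set ∩ classification set nonempty" test is "the count of that category is positive"
theorem pv_inter_pos (l : List String) (cat : List String)
    (hsub : ∀ y, cat.contains y = true → y ∈ (["P4","m6","M6","P11","m13","M13","P18","m20","M20"] : List String)) :
    (0 < (PySem.Set.inter (PySem.Set.ofList cat)
        (PySem.Set.inter (PySem.Set.ofList l) (["P4","m6","M6","P11","m13","M13","P18","m20","M20"] : List String))).length) ↔
      0 < l.countP (fun x => cat.contains x) := by
  rw [List.length_pos_iff_exists_mem, List.countP_pos_iff]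
  constructor
  · rintro ⟨y, hy⟩
    rw [PySem.Set.mem_inter, PySem.Set.mem_ofList] at hy
    obtain ⟨hcat, hcl⟩ := hy
    rw [PySem.Set.mem_inter, PySem.Set.mem_ofList] at hcl
    exact ⟨y, hcl.1, by simpa using hcat⟩
  · rintro ⟨y, hyl, hyc⟩
    refine ⟨y, ?_⟩
    rw [PySem.Set.mem_inter, PySem.Set.mem_ofList, PySem.Set.mem_inter, PySem.Set.mem_ofList]
    exact ⟨by simpa using hyc, hyl, hsub y (by simpa using hyc)⟩

theorem pv_sub4 : ∀ y, (["P4","P11","P18"] : List String).contains y = true →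
    y ∈ (["P4","m6","M6","P11","m13","M13","P18","m20","M20"] : List String) := by
  intro y hy
  simp at hy ⊢
  tauto

theorem pv_sub6 : ∀ y, (["m6","M6","m13","M13","m20","M20"] : List String).contains y = true →
    y ∈ (["P4","m6","M6","P11","m13","M13","P18","m20","M20"] : List String) := by
  intro y hy
  simp at hy ⊢
  tauto

-- ===== VERDICT (by name: the statement is the Claim_ definition above) =====
theorem getDisposition_py_spec : Claim_equal_getDisposition_py := by
  intro l _
  unfold Spec_getDisposition_py getDisposition_py getDisposition_py_alt
  rw [pvStep_foldl]
  simp only [← List.countP_eq_length_filter]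
  by_cases h4 : l.countP (fun x => (["P4","P11","P18"] : List String).contains x) = 0 <;>
    by_cases h6 : l.countP (fun x => (["m6","M6","m13","M13","m20","M20"] : List String).contains x) = 0
  · rw [if_pos ((pv_class_empty l).mpr ⟨h4, h6⟩),
        if_neg (c := (0 : Int) + _ ≠ 0) (by omega),
        if_neg (c := (0 : Int) + _ ≠ 0) (by omega)]
    simp only [List.cons.injEq, and_true]
    omega
  · rw [if_neg (fun hc => h6 ((pv_class_empty l).mp hc).2),
        if_neg (by rw [pv_inter_pos l _ pv_sub4]; omega),
        if_pos (by rw [pv_inter_pos l _ pv_sub6]; omega),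
        if_neg (c := (0 : Int) + _ ≠ 0) (by omega),
        if_pos (c := (0 : Int) + _ ≠ 0) (by omega)]
    simp only [List.cons.injEq, and_true]
    omega
  · rw [if_neg (fun hc => h4 ((pv_class_empty l).mp hc).1),
        if_pos (by rw [pv_inter_pos l _ pv_sub4]; omega),
        if_pos (c := (0 : Int) + _ ≠ 0) (by omega)]
    simp only [List.cons.injEq, and_true]
    omega
  · rw [if_neg (fun hc => h4 ((pv_class_empty l).mp hc).1),
        if_pos (by rw [pv_inter_pos l _ pv_sub4]; omega),
        if_pos (c := (0 : Int) + _ ≠ 0) (by omega)]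
    simp only [List.cons.injEq, and_true]
    omega
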